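-- pv_equiv track=rewrite | github.com/esoyeon/Algorithm | HR_FradulentActivityNotofications.py | countsort_median_double
-- ===== SOURCE A (Python) =====
-- def countsort_median_double(counter, d):
--     count = 0
--     for i in range(201): # 지출범위가 200이하라고 했으므로
--         count += counter[i]
--         if count > d // 2: # 중간값 나옴 (window의 길이가 d니까! d//2보다 카운트가 오바되는 순간이 중간값)
--             median = i
--             break
--
--     if d % 2 == 1: # 홀수
--         return median* 2
--
--     else:
--          # 짝수는 가운데 두 개의 평균으로 구해야 하므로
--          # 위에 찾은 중간값 바로 왼쪽에 위치하는 숫자를 찾아야 한다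
--          # 위에 중간값이 2개 이상일수도 있으므로, 중간값부터 왼쪽으로 탐색해서
--          # count를 유의미하게 줄이는 숫자가 왼쪽!
--         for left in range(i, -1, -1):
--             count -= counter[left]
--             if count < d//2:
--                 return left+median
-- ===== SOURCE B (Python) =====
-- def countsort_median_double(counter, d):
--     # Two forward rank lookups instead of A's forward-scan-then-backward-rescan.
--     def rank(k):
--         total = 0
--         for i in range(201):
--             total += counter[i]
--             if total > k:
--                 return i
--         raise ValueError("rank not found")
--
--     h = d // 2
--     if d % 2 == 1:
--         return 2 * rank(h)
--     return rank(h - 1) + rank(h)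
-- ===== Notes on version B (the rewrite author's own statement) =====
-- stated objective: alternative
-- what changed: Replaces A's backward re-scan (subtracting counts down from the median index) for the even case by a single reusable forward rank helper called twice: the even median pair is rank(d//2-1) + rank(d//2).
-- outside the precondition, e.g. on countsort_median_double([3, -1, 5], 6): A returns 4, B returns 2; on countsort_median_double([1], 0): A returns None, B returns 0
import Mathlib
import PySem

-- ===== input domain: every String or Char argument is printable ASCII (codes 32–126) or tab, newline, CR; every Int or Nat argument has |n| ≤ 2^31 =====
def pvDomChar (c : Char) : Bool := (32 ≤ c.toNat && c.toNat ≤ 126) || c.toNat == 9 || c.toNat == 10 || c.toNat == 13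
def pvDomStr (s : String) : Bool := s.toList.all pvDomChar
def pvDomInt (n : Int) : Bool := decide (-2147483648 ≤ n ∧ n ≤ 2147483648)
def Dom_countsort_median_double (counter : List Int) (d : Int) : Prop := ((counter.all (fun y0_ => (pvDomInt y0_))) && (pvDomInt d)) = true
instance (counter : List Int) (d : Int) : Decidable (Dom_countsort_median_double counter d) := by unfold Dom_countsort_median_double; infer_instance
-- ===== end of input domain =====

-- B replaces A's backward re-scan for the even case by calling one forward rank
-- helper twice (rank(d//2-1) + rank(d//2)); same cost, different decomposition.

-- ===== PORT A =====
-- the `for i in range(201)` loop: count += counter[i]; break with median=i when count > d//2.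
-- none = Python raises (IndexError on counter[i], or the loop ends without binding median).
def aScan (counter : List Int) (h : Int) : Int → List Nat → Option (Int × Nat)
  | _, [] => none
  | count, i :: rest =>
    match PySem.List.pyGet? counter (i : Int) with
    | none => none
    | some c =>
      if count + c > h then some (count + c, i)
      else aScan counter h (count + c) rest

-- the `for left in range(i, -1, -1)` loop: count -= counter[left]; return left+median when count < d//2.
-- none = the loop falls through (Python returns None) or counter[left] raises.
def aBack (counter : List Int) (h mi : Int) : Nat → Int → Option Int
  | 0, count =>
    match PySem.List.pyGet? counter ((0 : Nat) : Int) with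
    | none => none
    | some c => if count - c < h then some ((0 : Int) + mi) else none
  | l + 1, count =>
    match PySem.List.pyGet? counter ((l + 1 : Nat) : Int) with
    | none => none
    | some c =>
      if count - c < h then some (((l + 1 : Nat) : Int) + mi)
      else aBack counter h mi l (count - c)

def countsort_median_double (counter : List Int) (d : Int) : Int :=
  match aScan counter (PySem.Int.floordiv d 2) 0 (List.range 201) with
  | none => 0  -- Python raises here (outside Pre_)
  | some (count, m) =>
    if PySem.Int.mod d 2 = 1 then (m : Int) * 2
    else (aBack counter (PySem.Int.floordiv d 2) (m : Int) m count).getD 0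
         -- getD 0: the even loop fell through, Python returns None (outside Pre_)

-- ===== PORT B =====
-- B's rank(k): smallest i in range(201) with running total > k; none = B raises.
def rankAux (counter : List Int) (k : Int) : Int → List Nat → Option Nat
  | _, [] => none
  | total, i :: rest =>
    match PySem.List.pyGet? counter (i : Int) with
    | none => none
    | some c => if total + c > k then some i else rankAux counter k (total + c) rest

def countsort_median_double_alt (counter : List Int) (d : Int) : Int :=
  if PySem.Int.mod d 2 = 1 then
    match rankAux counter (PySem.Int.floordiv d 2) 0 (List.range 201) with
    | some i => 2 * (i : Int)
    | none => 0  -- B raises ValueError/IndexError here (outside Pre_)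
  else
    match rankAux counter (PySem.Int.floordiv d 2 - 1) 0 (List.range 201),
          rankAux counter (PySem.Int.floordiv d 2) 0 (List.range 201) with
    | some a, some b => (a : Int) + (b : Int)
    | _, _ => 0  -- B raises here (outside Pre_)

-- ===== PRECONDITION & SPEC =====
-- Pre_ restricts to the natural domain of a count array (first 201 entries nonnegative; A returns
-- accidental values on negative counts) and excludes the inputs where A raises (no prefix of the
-- first 201 readable entries ever exceeds d//2: IndexError or UnboundLocalError) or returns None
-- (even d with d//2 < 1: the even-case loop falls through).
def Pre_countsort_median_double (counter : List Int) (d : Int) : Prop :=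
  (∀ x ∈ counter.take 201, 0 ≤ x) ∧
  1 ≤ counter.length ∧
  (counter.take (min 201 counter.length)).sum > PySem.Int.floordiv d 2 ∧
  (PySem.Int.mod d 2 ≠ 1 → 1 ≤ PySem.Int.floordiv d 2)
instance (counter : List Int) (d : Int) : Decidable (Pre_countsort_median_double counter d) := by
  unfold Pre_countsort_median_double; infer_instance

def pvWitness_countsort_median_double : List Int × Int := ([5], 4)

def Spec_countsort_median_double (counter : List Int) (d : Int) (out : Int) : Prop := out = countsort_median_double_alt counter d
instance (counter : List Int) (d : Int) (out : Int) : Decidable (Spec_countsort_median_double counter d out) := by unfold Spec_countsort_median_double; infer_instance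

-- ===== CLAIM (what is proved, stated in full; the proofs are below) =====
def Claim_equal_countsort_median_double : Prop := ∀ (counter : List Int) (d : Int), Dom_countsort_median_double counter d → Pre_countsort_median_double counter d → Spec_countsort_median_double counter d (countsort_median_double counter d)

-- ===== LEMMAS AND PROOFS =====

lemma sum_take_mono (counter : List Int) (hnn : ∀ x ∈ counter.take 201, 0 ≤ x) :
    ∀ b a, a ≤ b → b ≤ 201 → (counter.take a).sum ≤ (counter.take b).sum := by
  intro b
  induction b with
  | zero => intro a ha _; interval_cases a; simp
  | succ b ih =>
    intro a ha hb
    rcases Nat.eq_or_lt_of_le ha with rfl | ha'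
    · exact le_refl _
    · have h1 : (counter.take a).sum ≤ (counter.take b).sum :=
        ih a (Nat.lt_succ_iff.mp ha') (by omega)
      by_cases hlen : b < counter.length
      · have := List.sum_take_succ counter b hlen
        have hx : 0 ≤ counter[b] := by
          refine hnn _ (List.mem_take_iff_getElem.mpr ⟨b, ?_, rfl⟩)
          omega
        omega
      · have he : counter.take (b + 1) = counter.take b := by
          rw [List.take_of_length_le (by omega), List.take_of_length_le (by omega)]
        rw [he]
        exact h1

-- the forward scan (shared shape of A's first loop and B's rank): finds the least index m
-- with prefix-sum (m+1) exceeding the threshold k, and returns that prefix sum with it.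
lemma aScan_range' (counter : List Int) (k : Int) :
    ∀ n i, i + n = 201 →
    (∃ j, i ≤ j ∧ j < 201 ∧ j < counter.length ∧ (counter.take (j + 1)).sum > k) →
    ∃ m, i ≤ m ∧ m < 201 ∧ m < counter.length ∧ (counter.take (m + 1)).sum > k ∧
      (∀ j, i ≤ j → j < m → (counter.take (j + 1)).sum ≤ k) ∧
      aScan counter k ((counter.take i).sum) (List.range' i n) = some ((counter.take (m + 1)).sum, m) := by
  intro n
  induction n with
  | zero =>
    intro i h201 ⟨j, hij, hj, _⟩
    omega
  | succ n ih =>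
    intro i h201 hex
    obtain ⟨j, hij, hj201, hjlen, hjsum⟩ := hex
    have hilen : i < counter.length := by omega
    have hstep := List.sum_take_succ counter i hilen
    rw [List.range'_succ]
    simp only [aScan, PySem.List.pyGet?_natCast, List.getElem?_eq_getElem hilen]
    by_cases hfire : (counter.take i).sum + counter[i] > k
    · refine ⟨i, le_refl _, by omega, hilen, by omega, by omega, ?_⟩
      simp only [hfire, if_pos]
      rw [hstep]
    · have hji : i ≠ j := by
        rintro rfl; omega
      obtain ⟨m, him, hm201, hmlen, hmsum, hmin, heq⟩ :=
        ih (i + 1) (by omega) ⟨j, by omega, hj201, hjlen, hjsum⟩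
      refine ⟨m, by omega, hm201, hmlen, hmsum, ?_, ?_⟩
      · intro j' hij' hj'm
        rcases Nat.eq_or_lt_of_le hij' with rfl | h'
        · omega
        · exact hmin j' (by omega) hj'm
      · simp only [hfire, if_false]
        rw [← hstep]
        exact heq

-- B's rank is the index component of A's forward scan (same loop shape, same threshold test).
lemma rankAux_eq_map (counter : List Int) (k : Int) :
    ∀ is total, rankAux counter k total is = (aScan counter k total is).map Prod.snd := by
  intro is
  induction is with
  | nil => intro total; rfl
  | cons i rest ih =>
    intro total
    simp only [rankAux, aScan]
    cases PySem.List.pyGet? counter (i : Int) with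
    | none => rfl
    | some c =>
      by_cases hfire : total + c > k
      · simp [hfire]
      · simp [hfire, ih]

-- A's backward loop, started at l with count = prefix-sum (l+1), stops exactly at r, the
-- greatest index ≤ l whose prefix sum is below h (here given with its characterisation).
lemma aBack_eq (counter : List Int) (h mi : Int) (r : Nat)
    (hr : (counter.take r).sum < h) :
    ∀ l, r ≤ l → l < counter.length →
    (∀ j, r < j → j ≤ l → h ≤ (counter.take j).sum) →
    aBack counter h mi l ((counter.take (l + 1)).sum) = some ((r : Int) + mi) := by
  intro l
  induction l with
  | zero =>
    intro hrl hlen _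
    have hr0 : r = 0 := by omega
    subst hr0
    have hstep := List.sum_take_succ counter 0 hlen
    simp only [aBack, PySem.List.pyGet?_natCast, List.getElem?_eq_getElem hlen]
    have : (counter.take (0 + 1)).sum - counter[0] < h := by
      rw [hstep]; simpa using hr
    simp [this]
  | succ l ih =>
    intro hrl hlen hup
    have hl : l < counter.length := by omega
    have hstep := List.sum_take_succ counter (l + 1) hlen
    simp only [aBack, PySem.List.pyGet?_natCast, List.getElem?_eq_getElem hlen]
    by_cases hre : r = l + 1
    · have hfire : (counter.take (l + 1 + 1)).sum - counter[l + 1] < h := by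
        rw [hre] at hr; rw [hstep]; omega
      simp [hfire, hre]
    · have hrle : r ≤ l := by omega
      have hnot : ¬ ((counter.take (l + 1 + 1)).sum - counter[l + 1] < h) := by
        rw [hstep]
        have := hup (l + 1) (by omega) (by omega)
        omega
      simp only [hnot, if_false]
      have harg : (counter.take (l + 1 + 1)).sum - counter[l + 1] = (counter.take (l + 1)).sum := by
        rw [hstep]; ring
      rw [harg]
      exact ih hrle hl (fun j hj hjl => hup j hj (by omega))

-- ===== VERDICT (by name: the statement is the Claim_ definition above) =====
theorem countsort_median_double_spec : Claim_equal_countsort_median_double := by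
  unfold Claim_equal_countsort_median_double
  intro counter d _ hpre
  obtain ⟨hnn, hlen1, hsum, heven⟩ := hpre
  unfold Spec_countsort_median_double
  -- the last readable index below 201 witnesses that the scan fires
  have hminle : min 201 counter.length ≤ counter.length := Nat.min_le_right _ _
  have hmin1 : 1 ≤ min 201 counter.length := by omega
  obtain ⟨j, hj201, hjlen, hj1⟩ :
      ∃ j, j < 201 ∧ j < counter.length ∧ j + 1 = min 201 counter.length :=
    ⟨min 201 counter.length - 1, by omega, by omega, by omega⟩
  have hjsum : (counter.take (j + 1)).sum > PySem.Int.floordiv d 2 := by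
    rw [hj1]; exact hsum
  -- A's forward scan at threshold h := d // 2
  obtain ⟨m, _, hm201, hmlen, hmsum, hmmin, hscan⟩ :=
    aScan_range' counter (PySem.Int.floordiv d 2) 201 0 rfl
      ⟨j, Nat.zero_le _, hj201, hjlen, hjsum⟩
  rw [show ((counter.take 0).sum : Int) = 0 by simp] at hscan
  rw [← List.range_eq_range'] at hscan
  by_cases hodd : PySem.Int.mod d 2 = 1
  · -- odd d: both return twice the scan index
    simp only [countsort_median_double, countsort_median_double_alt, hscan,
      rankAux_eq_map, hodd, if_pos]
    simp only [Option.map_some]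
    ring
  · -- even d: A's backward rescan lands on r = rank (h - 1)
    have h1 : 1 ≤ PySem.Int.floordiv d 2 := heven hodd
    obtain ⟨r, _, hr201, hrlen, hrsum, hrmin, hscan'⟩ :=
      aScan_range' counter (PySem.Int.floordiv d 2 - 1) 201 0 rfl
        ⟨m, Nat.zero_le _, hm201, hmlen, by omega⟩
    rw [show ((counter.take 0).sum : Int) = 0 by simp] at hscan'
    rw [← List.range_eq_range'] at hscan'
    have hrm : r ≤ m := by
      by_contra hc
      have := hrmin m (Nat.zero_le _) (by omega)
      omega
    have hrlow : (counter.take r).sum < PySem.Int.floordiv d 2 := by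
      cases r with
      | zero => simpa using h1
      | succ r' =>
        have := hrmin r' (Nat.zero_le _) (by omega)
        omega
    have hback := aBack_eq counter (PySem.Int.floordiv d 2) (m : Int) r hrlow m hrm hmlen
      (by
        intro j' hj' hj'm
        cases j' with
        | zero => omega
        | succ j'' =>
          have h2 : (counter.take (r + 1)).sum ≤ (counter.take (j'' + 1)).sum :=
            sum_take_mono counter hnn (j'' + 1) (r + 1) (by omega) (by omega)
          omega)
    simp only [countsort_median_double, countsort_median_double_alt, hscan, hscan',
      rankAux_eq_map, hodd, if_false]
    simp only [Option.map_some, hback, Option.getD_some]
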